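-- pv_equiv track=rewrite | github.com/ABHISHEKHATAKE/ai-oral-exam-system-3.0 | app/services/cheat_detector.py | _has_suspicious_patterns
-- ===== SOURCE A (Python) =====
-- def _has_suspicious_patterns(text: str) -> bool:
--     """Check for copy-paste indicators"""
--     # Check for repeated exact phrases (copy-paste error)
--     words = text.split()
--     if len(words) != len(set(words)):
--         # Has duplicate words - check if it's unusual
--         word_freq = {}
--         for word in words:
--             word_freq[word] = word_freq.get(word, 0) + 1
--
--         # If any word appears more than 3 times (excluding common words)
--         common_words = {'the', 'a', 'an', 'is', 'are', 'was', 'were', 'in', 'on', 'at'}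
--         for word, freq in word_freq.items():
--             if word.lower() not in common_words and freq > 3:
--                 return True
--
--     return False
-- ===== SOURCE B (Python) =====
-- from itertools import groupby
--
--
-- def _has_suspicious_patterns(text: str) -> bool:
--     """Check for copy-paste indicators (sort-and-group formulation)."""
--     common_words = {'the', 'a', 'an', 'is', 'are', 'was', 'were', 'in', 'on', 'at'}
--     for word, group in groupby(sorted(text.split())):
--         if sum(1 for _ in group) > 3 and word.lower() not in common_words:
--             return True
--     return False
-- ===== Notes on version B (the rewrite author's own statement) =====
-- stated objective: idiomatic
-- what changed: Replaces the duplicate-length guard plus hand-rolled frequency dict and dict scan by a single sort-then-groupby pass that tests each run length directly.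
import Mathlib
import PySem

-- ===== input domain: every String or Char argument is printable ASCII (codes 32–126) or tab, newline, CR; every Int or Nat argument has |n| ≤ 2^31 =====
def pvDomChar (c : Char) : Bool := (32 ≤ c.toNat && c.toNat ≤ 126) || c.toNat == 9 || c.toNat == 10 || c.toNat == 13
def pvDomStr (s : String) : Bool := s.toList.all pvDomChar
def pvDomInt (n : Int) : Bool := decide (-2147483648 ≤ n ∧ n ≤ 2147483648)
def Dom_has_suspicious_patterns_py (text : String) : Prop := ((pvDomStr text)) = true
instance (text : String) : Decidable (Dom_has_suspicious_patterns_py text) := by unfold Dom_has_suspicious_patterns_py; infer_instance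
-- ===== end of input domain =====

-- B replaces A's duplicate-length guard + frequency dict + dict scan by one
-- sort-then-groupby pass over the words (idiomatic; not claimed faster).


-- the common-words set literal shared by both sources
def pvCommonWords : List String :=
  ["the", "a", "an", "is", "are", "was", "were", "in", "on", "at"]

-- ===== PORT A =====
def has_suspicious_patterns_py (text : String) : Bool :=
  let words := PySem.Str.split₀ text
  if PySem.List.len words ≠ PySem.List.len (PySem.Set.ofList words) then
    -- word_freq[word] = word_freq.get(word, 0) + 1 over the words
    let word_freq : PySem.Dict String Int :=
      words.foldl (fun d w => d.insert w (d.getD w 0 + 1)) PySem.Dict.empty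
    -- for word, freq in word_freq.items(): if cond: return True
    word_freq.items.any (fun p =>
      !(pvCommonWords.contains (PySem.Str.lower p.1)) && decide ((3 : Int) < p.2))
  else
    false

-- ===== PORT B =====
-- groupby over a sorted list: each distinct word with the length of its run
def pvRuns : List String → List (String × Nat)
  | [] => []
  | x :: xs =>
      (x, 1 + (xs.takeWhile (· == x)).length) :: pvRuns (xs.dropWhile (· == x))
termination_by l => l.length
decreasing_by
  simpa using Nat.lt_succ_of_le (List.length_dropWhile_le _ _)

def has_suspicious_patterns_py_alt (text : String) : Bool :=
  (pvRuns (PySem.List.sorted (PySem.Str.split₀ text) (fun w => w))).any (fun p =>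
    decide (3 < p.2) && !(pvCommonWords.contains (PySem.Str.lower p.1)))

-- ===== PRECONDITION & SPEC =====
def Spec_has_suspicious_patterns_py (text : String) (out : Bool) : Prop := out = has_suspicious_patterns_py_alt text
instance (text : String) (out : Bool) : Decidable (Spec_has_suspicious_patterns_py text out) := by unfold Spec_has_suspicious_patterns_py; infer_instance

-- ===== CLAIM (what is proved, stated in full; the proofs are below) =====
def Claim_equal_has_suspicious_patterns_py : Prop := ∀ (text : String), Dom_has_suspicious_patterns_py text → Spec_has_suspicious_patterns_py text (has_suspicious_patterns_py text)

-- ===== LEMMAS AND PROOFS =====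

-- Set.ofList xs is a sublist of xs
lemma pv_foldl_add_sublist {α : Type} [BEq α] (xs : List α) (s : List α) :
    ∃ t, List.foldl PySem.Set.add s xs = s ++ t ∧ t.Sublist xs := by
  induction xs generalizing s with
  | nil => exact ⟨[], by simp⟩
  | cons x xs ih =>
    simp only [List.foldl_cons]
    by_cases h : (PySem.Set.add s x) = s
    · rw [h]
      obtain ⟨t, ht, hs⟩ := ih s
      exact ⟨t, ht, hs.cons x⟩
    · have hx : PySem.Set.add s x = s ++ [x] := by
        unfold PySem.Set.add at *
        split at h
        · simp_all
        · split <;> simp_all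
      rw [hx]
      obtain ⟨t, ht, hs⟩ := ih (s ++ [x])
      exact ⟨x :: t, by simpa using ht, hs.cons₂ x⟩

lemma pv_nodup_of_len_ofList {α : Type} [BEq α] [LawfulBEq α] (xs : List α)
    (h : (PySem.Set.ofList xs).length = xs.length) : xs.Nodup := by
  obtain ⟨t, ht, hs⟩ := pv_foldl_add_sublist xs ([] : List α)
  have hset : PySem.Set.ofList xs = t := by simpa [PySem.Set.ofList, PySem.Set.empty] using ht
  have heq : t = xs := hs.eq_of_length (by rw [← hset, h])
  have hnd := PySem.Set.nodup_ofList xs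
  rwa [hset, heq] at hnd

-- run lengths on a ≤-sorted list are exactly the counts
lemma pv_runs_mem (l : List String) (hps : l.Pairwise (· ≤ ·)) :
    ∀ w n, ((w, n) ∈ pvRuns l ↔ w ∈ l ∧ n = l.count w) := by
  induction l using pvRuns.induct with
  | case1 => simp [pvRuns]
  | case2 x xs ih =>
    intro w n
    have hx : ∀ y ∈ xs, x ≤ y := (List.pairwise_cons.mp hps).1
    have hpxs : xs.Pairwise (· ≤ ·) := (List.pairwise_cons.mp hps).2
    have hsplit : xs.takeWhile (· == x) ++ xs.dropWhile (· == x) = xs :=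
      List.takeWhile_append_dropWhile
    have htx : ∀ y ∈ xs.takeWhile (· == x), y = x := fun y hy => by
      simpa using List.mem_takeWhile_imp hy
    have hpd : (xs.dropWhile (· == x)).Pairwise (· ≤ ·) :=
      hpxs.sublist (List.dropWhile_sublist _)
    have hdlt : ∀ y ∈ xs.dropWhile (· == x), x < y := by
      cases hd : xs.dropWhile (· == x) with
      | nil => simp
      | cons h' d' =>
        have hne : xs.dropWhile (· == x) ≠ [] := by simp [hd]
        have hh' : ¬ ((xs.dropWhile (· == x)).head hne == x) = true := by
          simp [List.head_dropWhile_not _ hne]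
        have hh'x : h' ≠ x := by
          intro he; apply hh'; simp [hd, he]
        have hh'mem : h' ∈ xs :=
          (List.dropWhile_sublist (· == x)).mem (hd ▸ List.mem_cons_self)
        have hxh' : x < h' := lt_of_le_of_ne (hx _ hh'mem) (Ne.symm hh'x)
        intro y hy
        rcases List.mem_cons.mp hy with h | h
        · exact h ▸ hxh'
        · have hpd' : (h' :: d').Pairwise (· ≤ ·) := hd ▸ hpd
          exact lt_of_lt_of_le hxh' ((List.pairwise_cons.mp hpd').1 y h)
    have hxnotd : x ∉ xs.dropWhile (· == x) := fun h => lt_irrefl x (hdlt x h)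
    have hcountx : (x :: xs).count x = 1 + (xs.takeWhile (· == x)).length := by
      have h1 : (xs.takeWhile (· == x)).count x = (xs.takeWhile (· == x)).length :=
        List.count_eq_length.mpr (fun y hy => (htx y hy).symm)
      have h2 : (xs.dropWhile (· == x)).count x = 0 := List.count_eq_zero.mpr hxnotd
      rw [List.count_cons_self]
      conv_lhs => rw [← hsplit]
      rw [List.count_append, h1, h2]
      omega
    have hcountd : ∀ y ∈ xs.dropWhile (· == x),
        (x :: xs).count y = (xs.dropWhile (· == x)).count y := by
      intro y hy
      have hyx : y ≠ x := fun h => hxnotd (h ▸ hy)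
      have h1 : (xs.takeWhile (· == x)).count y = 0 :=
        List.count_eq_zero.mpr (fun h => hyx (htx y h))
      have hstep : List.count y (x :: xs) = List.count y xs := by
        rw [List.count_cons]
        have : ¬ x = y := fun h => hyx h.symm
        simp [this]
      rw [hstep]
      conv_lhs => rw [← hsplit]
      rw [List.count_append, h1]
      omega
    rw [pvRuns, List.mem_cons, Prod.mk.injEq]
    constructor
    · rintro (⟨hw1, hw2⟩ | hmem)
      · subst hw1
        exact ⟨List.mem_cons_self, by rw [hcountx]; exact hw2⟩
      · obtain ⟨hwd, hnd⟩ := (ih hpd w n).mp hmem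
        refine ⟨List.mem_cons_of_mem x ?_, ?_⟩
        · exact hsplit ▸ List.mem_append_right _ hwd
        · rw [hcountd w hwd]; exact hnd
    · rintro ⟨hwmem, hn⟩
      by_cases hwx : w = x
      · subst hwx
        exact Or.inl ⟨rfl, by rw [hn, hcountx]⟩
      · have hwxs : w ∈ xs := by
          rcases List.mem_cons.mp hwmem with h | h
          · exact absurd h hwx
          · exact h
        have hwd : w ∈ xs.dropWhile (· == x) := by
          rw [← hsplit] at hwxs
          rcases List.mem_append.mp hwxs with h | h
          · exact absurd (htx w h) hwx
          · exact h
        exact Or.inr ((ih hpd w n).mpr ⟨hwd, by rw [← hcountd w hwd]; exact hn⟩)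

-- the common predicate: some non-common word occurs more than 3 times
def pvSusp (words : List String) : Prop :=
  ∃ w ∈ words, 3 < words.count w ∧ pvCommonWords.contains (PySem.Str.lower w) = false

lemma pv_A_iff (words : List String) :
    ((if PySem.List.len words ≠ PySem.List.len (PySem.Set.ofList words) then
        (words.foldl (fun d w => d.insert w (d.getD w 0 + 1)) PySem.Dict.empty).items.any
          (fun p => !(pvCommonWords.contains (PySem.Str.lower p.1)) && decide ((3 : Int) < p.2))
      else false) = true) ↔ pvSusp words := by
  rw [PySem.Dict.foldl_insert_getD_add_one_eq_counter]
  constructor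
  · intro h
    split at h
    · rw [List.any_eq_true] at h
      obtain ⟨p, hp, hcond⟩ := h
      rw [PySem.Dict.items_counter, List.mem_map] at hp
      obtain ⟨k, hk, hpk⟩ := hp
      subst hpk
      simp only [Bool.and_eq_true, Bool.not_eq_true', decide_eq_true_eq] at hcond
      refine ⟨k, (PySem.Set.mem_ofList words k).mp hk, ?_, hcond.1⟩
      exact_mod_cast hcond.2
    · exact absurd h (by simp)
  · rintro ⟨w, hw, hcnt, hcom⟩
    have hnodup : ¬ words.Nodup := by
      intro hnd
      have := List.nodup_iff_count_le_one.mp hnd w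
      omega
    have hguard : PySem.List.len words ≠ PySem.List.len (PySem.Set.ofList words) := by
      intro h
      apply hnodup
      apply pv_nodup_of_len_ofList
      simp only [PySem.List.len] at h
      omega
    rw [if_pos hguard, List.any_eq_true]
    refine ⟨(w, (words.count w : Int)), ?_, ?_⟩
    · rw [PySem.Dict.items_counter, List.mem_map]
      exact ⟨w, (PySem.Set.mem_ofList words w).mpr hw, rfl⟩
    · simp only [Bool.and_eq_true, Bool.not_eq_true', decide_eq_true_eq]
      exact ⟨hcom, by exact_mod_cast hcnt⟩

lemma pv_B_iff (words : List String) :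
    ((pvRuns (PySem.List.sorted words (fun w => w))).any (fun p =>
        decide (3 < p.2) && !(pvCommonWords.contains (PySem.Str.lower p.1))) = true)
      ↔ pvSusp words := by
  have hperm := PySem.List.sorted_perm words (fun w => w) false
  have hps : (PySem.List.sorted words (fun w => w)).Pairwise (· ≤ ·) := by
    simpa using PySem.List.sorted_pairwise words (fun w => w)
  rw [List.any_eq_true]
  constructor
  · rintro ⟨⟨w, n⟩, hmem, hcond⟩
    obtain ⟨hwmem, hn⟩ := (pv_runs_mem _ hps w n).mp hmem
    simp only [Bool.and_eq_true, Bool.not_eq_true', decide_eq_true_eq] at hcond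
    refine ⟨w, hperm.mem_iff.mp hwmem, ?_, hcond.2⟩
    rw [← hperm.count_eq, ← hn]
    exact hcond.1
  · rintro ⟨w, hw, hcnt, hcom⟩
    refine ⟨(w, (PySem.List.sorted words (fun w => w)).count w), ?_, ?_⟩
    · exact (pv_runs_mem _ hps w _).mpr ⟨hperm.mem_iff.mpr hw, rfl⟩
    · simp only [Bool.and_eq_true, Bool.not_eq_true', decide_eq_true_eq]
      exact ⟨by rw [hperm.count_eq]; exact hcnt, hcom⟩

-- ===== VERDICT (by name: the statement is the Claim_ definition above) =====
theorem has_suspicious_patterns_py_spec : Claim_equal_has_suspicious_patterns_py := by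
  intro text _
  unfold Spec_has_suspicious_patterns_py has_suspicious_patterns_py has_suspicious_patterns_py_alt
  set words := PySem.Str.split₀ text
  have hA := pv_A_iff words
  have hB := pv_B_iff words
  by_cases h : pvSusp words
  · rw [hA.mpr h, hB.mpr h]
  · rw [Bool.eq_false_iff.mpr (fun hh => h (hA.mp hh)),
        Bool.eq_false_iff.mpr (fun hh => h (hB.mp hh))]
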